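-- pv_equiv track=rewrite | github.com/ZeaWolf/Nonlinear-Transform-Overfitting-Un-derfitting-Regularization-and-cross-validation | CSE353Assignment6_code.py | Poly_Transform
-- ===== SOURCE A (Python) =====
-- def Poly_Transform(Q, x):
--     # Calculate the Qth order polynomial transform by recursive
--     # Base case if Q<0, z[n] = []
--     if Q < 0:
--         z = []
--         for n in range(len(x)):
--             z.append([])
--         return z
--
--     # z[n] = [x[n]^0, x[n]^1, x[n]^2, ..., x[n]^Q-1, x[n]^Q]
--     else:
--         z = Poly_Transform((Q-1), x)
--         for n in range(len(x)):
--             z[n].append(x[n]**Q)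
--         return z
-- ===== SOURCE B (Python) =====
-- def Poly_Transform(Q, x):
--     return [[x[n] ** q for q in range(Q + 1)] for n in range(len(x))]
-- ===== Notes on version B (the rewrite author's own statement) =====
-- stated objective: simpler
-- what changed: Replaces the recursion on Q (base-case branch building empty lists, then appending x[n]**Q at each level) with a single non-recursive nested comprehension building each row [x[n]**q for q in range(Q+1)] directly; range(Q+1) being empty for Q<0 subsumes the base case.
import Mathlib
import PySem

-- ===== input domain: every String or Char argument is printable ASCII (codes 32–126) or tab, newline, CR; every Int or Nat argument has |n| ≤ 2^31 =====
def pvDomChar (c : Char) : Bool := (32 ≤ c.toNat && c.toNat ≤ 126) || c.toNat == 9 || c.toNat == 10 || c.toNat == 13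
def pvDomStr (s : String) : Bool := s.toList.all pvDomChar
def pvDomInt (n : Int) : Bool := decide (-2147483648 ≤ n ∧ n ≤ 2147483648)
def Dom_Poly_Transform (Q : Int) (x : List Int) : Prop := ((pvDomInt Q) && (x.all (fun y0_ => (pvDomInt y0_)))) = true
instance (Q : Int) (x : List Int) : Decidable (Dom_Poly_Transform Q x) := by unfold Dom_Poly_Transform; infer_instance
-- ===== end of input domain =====

-- B replaces A's recursion on Q by a single non-recursive nested comprehension (simpler; same cost).

-- ===== PORT A =====
-- A: recursion on Q; base case Q < 0 builds a list of empty rows by appending;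
-- else recurse on Q-1 and append x[n]**Q to each row (the in-place loop over
-- n in range(len(x)) is ported as zipWith over the rows, which A keeps aligned with x).
def Poly_Transform (Q : Int) (x : List Int) : List (List Int) :=
  if Q < 0 then
    (List.range x.length).foldl (fun z _ => z ++ [([] : List Int)]) []
  else
    let z := Poly_Transform (Q - 1) x
    List.zipWith (fun zn xn => zn ++ [xn ^ Q.toNat]) z x
termination_by (Q + 1).toNat
decreasing_by omega

-- ===== PORT B =====
-- B: [[x[n] ** q for q in range(Q+1)] for n in range(len(x))]
def Poly_Transform_alt (Q : Int) (x : List Int) : List (List Int) :=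
  x.map (fun xn => (PySem.List.pyRange 0 (Q + 1) 1).map (fun q => xn ^ q.toNat))

-- ===== PRECONDITION & SPEC =====
-- Pre_ excludes exactly the inputs on which A RAISES: for Q >= 9996 A's recursion of
-- depth Q+2 exceeds the interpreter's recursion limit and A raises RecursionError.
def Pre_Poly_Transform (Q : Int) (x : List Int) : Prop := Q ≤ 9995
instance (Q : Int) (x : List Int) : Decidable (Pre_Poly_Transform Q x) := by unfold Pre_Poly_Transform; infer_instance
def pvWitness_Poly_Transform : Int × List Int := (3, [2, -1, 5])

def Spec_Poly_Transform (Q : Int) (x : List Int) (out : List (List Int)) : Prop := out = Poly_Transform_alt Q x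
instance (Q : Int) (x : List Int) (out : List (List Int)) : Decidable (Spec_Poly_Transform Q x out) := by unfold Spec_Poly_Transform; infer_instance

-- ===== CLAIM (what is proved, stated in full; the proofs are below) =====
def Claim_equal_Poly_Transform : Prop := ∀ (Q : Int) (x : List Int), Dom_Poly_Transform Q x → Pre_Poly_Transform Q x → Spec_Poly_Transform Q x (Poly_Transform Q x)

-- ===== LEMMAS AND PROOFS =====

theorem zipWith_map_left_self {α β : Type} (g : β → α → β) (f : α → β) (x : List α) :
    List.zipWith g (x.map f) x = x.map (fun a => g (f a) a) := by
  induction x with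
  | nil => rfl
  | cons a t ih => simp [ih]

theorem poly_transform_eq (Q : Int) (x : List Int) :
    Poly_Transform Q x = Poly_Transform_alt Q x := by
  by_cases h : Q < 0
  case pos =>
    rw [Poly_Transform, if_pos h]
    unfold Poly_Transform_alt
    rw [PySem.List.pyRange_one_eq_nil (by omega)]
    rw [PySem.List.foldl_append_singleton_eq_map]
    simp
  case neg =>
    rw [Poly_Transform, if_neg h]
    rw [poly_transform_eq (Q - 1) x]
    unfold Poly_Transform_alt
    rw [zipWith_map_left_self]
    apply List.map_congr_left
    intro a _
    rw [show Q - 1 + 1 = Q from by ring]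
    rw [PySem.List.pyRange_one_succ_right (show (0:Int) ≤ Q by omega)]
    simp
termination_by (Q + 1).toNat
decreasing_by omega

-- ===== VERDICT (by name: the statement is the Claim_ definition above) =====
theorem Poly_Transform_spec : Claim_equal_Poly_Transform := by
  intro Q x _ _
  unfold Spec_Poly_Transform
  exact poly_transform_eq Q x
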